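-- pv_equiv track=rewrite | github.com/Astri2/AdventOfCode | 2023/dayy12/old/d12_1.py | gen_possibilities
-- ===== SOURCE A (Python) =====
-- def gen_possibilities(record: str):
--     stack = set()
--     res = set()
--     stack.add((record, record.count('?')))
--     while(len(stack) > 0):
--         rec, i = stack.pop()
--         if i == 0:
--             res.add(rec)
--             continue
--         stack.add((rec.replace('?','.',1),i-1))
--         stack.add((rec.replace('?','#',1),i-1))
--     return res
-- ===== SOURCE B (Python) =====
-- def gen_possibilities(record: str):
--     def fill(rec):
--         i = rec.find('?')
--         if i < 0:
--             return [rec]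
--         return [s for c in '#.' for s in fill(rec[:i] + c + rec[i+1:])]
--     return set(fill(record))
-- ===== Notes on version B (the rewrite author's own statement) =====
-- stated objective: simpler
-- what changed: Replaces A's explicit worklist of (partial string, remaining-'?' count) tuples held in a set with a direct recursion on the first '?' (str.find plus slicing), collecting the completed strings with a comprehension and one final set().
import Mathlib
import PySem

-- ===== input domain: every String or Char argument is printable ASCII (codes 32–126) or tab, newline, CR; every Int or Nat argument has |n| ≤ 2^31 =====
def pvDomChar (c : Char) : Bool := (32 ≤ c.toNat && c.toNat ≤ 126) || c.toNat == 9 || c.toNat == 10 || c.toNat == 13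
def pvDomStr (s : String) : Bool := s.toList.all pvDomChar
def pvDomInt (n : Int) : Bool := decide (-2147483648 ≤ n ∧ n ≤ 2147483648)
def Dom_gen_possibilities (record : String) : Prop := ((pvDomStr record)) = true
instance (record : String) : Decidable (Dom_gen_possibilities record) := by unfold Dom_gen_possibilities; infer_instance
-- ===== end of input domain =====

-- B replaces A's explicit worklist of (partial string, remaining-'?' count) pairs with a direct
-- recursion on the first '?' (find + slicing), collected by a comprehension; objective: simpler.
-- Python A returns a set and pops its worklist in unspecified hash order; the returned SET does not
-- depend on that order, so the worklist is ported LIFO and sets are PySem.Set lists (compared as sets).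


-- ===== PORT A =====
-- rec.replace('?', c, 1) ported by hand (PySem.Str.replace has no count argument): exact for a
-- single-character pattern — replaces the first '?' if there is one, else returns the list unchanged.
def pvRep1 : List Char → Char → List Char
  | [], _ => []
  | x :: xs, c => if x = '?' then c :: xs else x :: pvRep1 xs c

-- A's while-loop over the worklist. Python's `stack` is a set popped in unspecified order; the
-- result set is the same for every pop order, so the stack is a LIFO list here (the '.'-entry is
-- added first and the '#'-entry second, exactly as in A, hence the '#'-entry is popped first).
-- The counter i is Python's int; it starts as a count (≥ 0) and is only decremented when > 0, so it
-- is carried as the equal Nat value.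
def pvLoopA : List (List Char × Nat) → PySem.Set (List Char) → PySem.Set (List Char)
  | [], res => res
  | (rec, 0) :: st, res => pvLoopA st (PySem.Set.add res rec)
  | (rec, i + 1) :: st, res =>
      pvLoopA ((pvRep1 rec '#', i) :: (pvRep1 rec '.', i) :: st) res
termination_by st _ => (st.map (fun p => 3 ^ p.2)).sum
decreasing_by
  · simp
  · have h0 : 0 < 3 ^ i := by positivity
    simp [pow_succ]; omega

def gen_possibilities (record : String) : List String :=
  (pvLoopA [(record.toList, PySem.Str.count record "?")] PySem.Set.empty).map (fun cs => String.ofList cs)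

-- ===== PORT B =====
-- two facts cited by pvFillB's decreasing_by: the first '?' found by rec.find('?') really is a '?'
-- with no '?' before it, and splicing a non-'?' character there lowers the '?' count
theorem pvFind_facts (cs : List Char) (h : '?' ∈ cs) :
    ∃ j : Nat, PySem.Chars.find cs ['?'] = (j : Int) ∧ '?' ∉ cs.take j ∧
      cs.drop j = '?' :: cs.drop (j + 1) := by
  have hinf : ['?'] <:+: cs := (List.singleton_infix_iff '?' cs).mpr h
  have hne : PySem.Chars.find cs ['?'] ≠ -1 := (PySem.Chars.find_ne_neg_one_iff cs ['?']).mpr hinf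
  have hnn : 0 ≤ PySem.Chars.find cs ['?'] := (PySem.Chars.find_nonneg_iff cs ['?']).mpr hinf
  have hspec := PySem.Chars.findFrom_natCast_spec cs ['?'] 0 (Nat.zero_le _)
    (by simpa [PySem.Chars.findFrom_zero] using hne)
  rw [Nat.cast_zero, PySem.Chars.findFrom_zero] at hspec
  obtain ⟨-, hpre, hmin⟩ := hspec
  set j := (PySem.Chars.find cs ['?']).toNat with hj
  refine ⟨j, by omega, ?_, ?_⟩
  · intro hmem
    obtain ⟨m, hm, hem⟩ := List.mem_take_iff_getElem.mp hmem
    have hmj : m < j := lt_of_lt_of_le hm (min_le_left _ _)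
    exact hmin m (Nat.zero_le _) hmj ⟨cs.drop (m+1), by
      rw [show ['?'] ++ cs.drop (m+1) = '?' :: cs.drop (m+1) from rfl,
        ← hem, List.getElem_cons_drop]⟩
  · obtain ⟨t, ht⟩ := hpre
    have hdl : cs.drop j = '?' :: t := by simpa using ht.symm
    have h1 : (cs.drop j).drop 1 = cs.drop (j + 1) := List.drop_drop
    rw [← h1, hdl]; rfl

theorem pvSplice_count_lt (cs : List Char) (c : Char) (hc : c ≠ '?')
    (h : ¬ PySem.Chars.find cs ['?'] < 0) :
    (PySem.Chars.slice cs none (some (PySem.Chars.find cs ['?'])) ++ [c] ++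
      PySem.Chars.slice cs (some (PySem.Chars.find cs ['?'] + 1)) none).count '?' < cs.count '?' := by
  have hmem : '?' ∈ cs := (List.singleton_infix_iff '?' cs).mp
    ((PySem.Chars.find_nonneg_iff cs ['?']).mp (by omega))
  obtain ⟨j, hj, htake, hdrop⟩ := pvFind_facts cs hmem
  rw [hj]
  have h1 : PySem.Chars.slice cs none (some (j:Int)) = cs.take j := by
    simp [PySem.Chars.slice_eq_listSlice, PySem.List.slice_to_natCast]
  have h2 : PySem.Chars.slice cs (some ((j:Int) + 1)) none = cs.drop (j+1) := by
    have hs := PySem.List.slice_from (xs := cs) (a := (j:Int)+1) (by positivity)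
    simp [PySem.Chars.slice_eq_listSlice, hs, show ((j:Int)+1).toNat = j+1 by omega]
  rw [h1, h2]
  have hsplit : cs.count '?' = (cs.take j).count '?' + ('?' :: cs.drop (j+1)).count '?' := by
    conv_lhs => rw [← List.take_append_drop j cs, hdrop]
    rw [List.count_append]
  have ht0 : (cs.take j).count '?' = 0 := List.count_eq_zero.mpr htake
  simp [List.count_append, ht0, hc] at hsplit ⊢
  omega

-- Source B's fill: find the first '?', branch on '#' then '.' (the comprehension over the two-character
-- literal '#.' is unrolled), recurse on the spliced string rec[:i] + c + rec[i+1:].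
def pvFillB (rec : List Char) : List (List Char) :=
  if PySem.Chars.find rec ['?'] < 0 then [rec]
  else
    pvFillB (PySem.Chars.slice rec none (some (PySem.Chars.find rec ['?'])) ++ ['#'] ++
             PySem.Chars.slice rec (some (PySem.Chars.find rec ['?'] + 1)) none) ++
    pvFillB (PySem.Chars.slice rec none (some (PySem.Chars.find rec ['?'])) ++ ['.'] ++
             PySem.Chars.slice rec (some (PySem.Chars.find rec ['?'] + 1)) none)
termination_by rec.count '?'
decreasing_by
  · exact pvSplice_count_lt _ _ (by decide) (by assumption)
  · exact pvSplice_count_lt _ _ (by decide) (by assumption)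

def gen_possibilities_alt (record : String) : List String :=
  (PySem.Set.ofList (pvFillB record.toList)).map (fun cs => String.ofList cs)

-- ===== PRECONDITION & SPEC =====
def Spec_gen_possibilities (record : String) (out : List String) : Prop := out = gen_possibilities_alt record
instance (record : String) (out : List String) : Decidable (Spec_gen_possibilities record out) := by unfold Spec_gen_possibilities; infer_instance

-- ===== CLAIM (what is proved, stated in full; the proofs are below) =====
def Claim_equal_gen_possibilities : Prop := ∀ (record : String), Dom_gen_possibilities record → Spec_gen_possibilities record (gen_possibilities record)

-- ===== LEMMAS AND PROOFS =====

-- the strings A's worklist emits from one node (rec, i), in the LIFO order of the port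
def pvE : List Char → Nat → List (List Char)
  | cs, 0 => [cs]
  | cs, i + 1 => pvE (pvRep1 cs '#') i ++ pvE (pvRep1 cs '.') i

theorem pvCount_go (c : Char) : ∀ (fuel : Nat) (s : List Char) (acc : Nat), s.length ≤ fuel →
    PySem.Chars.count.go [c] fuel s acc = acc + s.count c := by
  intro fuel
  induction fuel with
  | zero => intro s acc h; cases s with
    | nil => simp [PySem.Chars.count.go]
    | cons x xs => simp at h
  | succ n ih => intro s acc h; cases s with
    | nil => simp [PySem.Chars.count.go]
    | cons x xs =>
      rw [PySem.Chars.count.go]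
      by_cases hx : x = c
      · simp [hx, List.isPrefixOf, ih xs (acc + 1) (by simpa using h)]
        omega
      · simp [List.isPrefixOf, Ne.symm hx, hx, ih xs acc (by simpa using h)]

theorem pvCount_bridge (cs : List Char) (c : Char) : PySem.Chars.count cs [c] = cs.count c := by
  simp [PySem.Chars.count]
  simpa using pvCount_go c cs.length cs 0 le_rfl

theorem pvRep1_splice : ∀ (cs : List Char) (j : Nat) (c : Char), '?' ∉ cs.take j →
    cs.drop j = '?' :: cs.drop (j + 1) → pvRep1 cs c = cs.take j ++ c :: cs.drop (j + 1) := by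
  intro cs
  induction cs with
  | nil => intro j c _ h2; simp at h2
  | cons x xs ih =>
    intro j c h1 h2
    cases j with
    | zero =>
      simp at h2 ⊢
      simp [pvRep1, h2]
    | succ j =>
      simp at h1 h2 ⊢
      have hx : x ≠ '?' := fun hh => h1.1 hh.symm
      simp [pvRep1, hx, ih j c (fun hm => h1.2 hm) h2]

theorem pvE_eq_fill : ∀ (i : Nat) (cs : List Char), cs.count '?' = i → pvE cs i = pvFillB cs := by
  intro i
  induction i with
  | zero =>
    intro cs hc
    have hmem : '?' ∉ cs := by
      intro hm; have := List.count_pos_iff.mpr hm; omega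
    have hfind : PySem.Chars.find cs ['?'] = -1 :=
      (PySem.Chars.find_eq_neg_one_iff cs ['?']).mpr
        (fun hinf => hmem ((List.singleton_infix_iff '?' cs).mp hinf))
    rw [pvE, pvFillB, if_pos (by rw [hfind]; norm_num)]
  | succ i ih =>
    intro cs hc
    have hmem : '?' ∈ cs := by
      by_contra hm; rw [List.count_eq_zero.mpr hm] at hc; omega
    obtain ⟨j, hj, htake, hdrop⟩ := pvFind_facts cs hmem
    have h1 : PySem.Chars.slice cs none (some (PySem.Chars.find cs ['?'])) = cs.take j := by
      simp [hj, PySem.Chars.slice_eq_listSlice, PySem.List.slice_to_natCast]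
    have h2 : PySem.Chars.slice cs (some (PySem.Chars.find cs ['?'] + 1)) none = cs.drop (j+1) := by
      have hs := PySem.List.slice_from (xs := cs) (a := (j:Int)+1) (by positivity)
      simp [hj, PySem.Chars.slice_eq_listSlice, hs, show ((j:Int)+1).toNat = j+1 by omega]
    have hcnt : ∀ c : Char, c ≠ '?' → (cs.take j ++ c :: cs.drop (j+1)).count '?' = i := by
      intro c hcne
      have hsplit : cs.count '?' = (cs.take j).count '?' + ('?' :: cs.drop (j+1)).count '?' := by
        conv_lhs => rw [← List.take_append_drop j cs, hdrop]
        rw [List.count_append]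
      have ht0 : (cs.take j).count '?' = 0 := List.count_eq_zero.mpr htake
      simp [List.count_append, ht0, hcne] at hsplit ⊢
      omega
    rw [pvE, pvFillB, if_neg (by rw [hj]; omega)]
    rw [h1, h2]
    rw [pvRep1_splice cs j '#' htake hdrop, pvRep1_splice cs j '.' htake hdrop]
    rw [ih _ (hcnt '#' (by decide)), ih _ (hcnt '.' (by decide))]
    simp

theorem pvLoopA_eq : ∀ (st : List (List Char × Nat)) (res : PySem.Set (List Char)),
    pvLoopA st res = (st.flatMap (fun p => pvE p.1 p.2)).foldl PySem.Set.add res := by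
  intro st res
  induction st, res using pvLoopA.induct with
  | case1 res => simp [pvLoopA]
  | case2 rec st res ih => rw [pvLoopA, ih]; simp [pvE]
  | case3 rec i st res ih => rw [pvLoopA, ih]; simp [pvE, List.foldl_append]

-- ===== VERDICT (by name: the statement is the Claim_ definition above) =====
theorem gen_possibilities_spec : Claim_equal_gen_possibilities := by
  intro record _
  unfold Spec_gen_possibilities gen_possibilities gen_possibilities_alt
  rw [pvLoopA_eq]
  simp only [List.flatMap_cons, List.flatMap_nil, List.append_nil]
  rw [show PySem.Str.count record "?" = record.toList.count '?' by
        simp [PySem.Str.count_eq]; exact pvCount_bridge _ _]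
  rw [pvE_eq_fill _ _ rfl]
  rw [PySem.Set.ofList_eq_foldl]
  rfl
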